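-- pv_equiv track=rewrite | github.com/notwulin/RivalSense | backend/services/data_analyzer.py | _label_cluster
-- ===== SOURCE A (Python) =====
-- PAIN_CATEGORY_RULES = [
--     ("稳定性与故障", {"bug", "crash", "error", "broken", "not_working", "fail", "downtime"}),
--     ("性能与响应速度", {"slow", "laggy", "slow_performance", "latency", "performance"}),
--     ("价格与订阅成本", {"expensive", "overpriced", "pricing", "pricing_problem", "subscription", "refund"}),
--     ("功能缺口与集成", {"missing", "missing_feature", "feature_request", "integration", "api", "export", "import"}),
--     ("易用性与界面复杂度", {"confusing", "clunky", "unintuitive", "hard_to_use", "complex", "ui", "ux"}),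
--     ("账号与登录", {"login", "login_problem", "account", "auth", "authentication", "password"}),
--     ("客服与退款", {"support", "customer_support", "refund", "ticket", "response"}),
--     ("隐私与安全", {"privacy", "security", "security_incident", "breach", "encrypted", "encryption"}),
-- ]
--
-- def _label_cluster(keywords):
--     keyword_set = {kw.replace(" ", "_") for kw in keywords}
--     keyword_set.update(part for kw in keywords for part in kw.split())
--
--     for label, triggers in PAIN_CATEGORY_RULES:
--         if keyword_set & triggers:
--             return label
--
--     if keywords:
--         return f"围绕 {keywords[0]} 的集中抱怨"
--     return "未命名痛点"
-- ===== SOURCE B (Python) =====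
-- PAIN_CATEGORY_RULES = [
--     ("稳定性与故障", ["bug", "crash", "error", "broken", "not_working", "fail", "downtime"]),
--     ("性能与响应速度", ["slow", "laggy", "slow_performance", "latency", "performance"]),
--     ("价格与订阅成本", ["expensive", "overpriced", "pricing", "pricing_problem", "subscription", "refund"]),
--     ("功能缺口与集成", ["missing", "missing_feature", "feature_request", "integration", "api", "export", "import"]),
--     ("易用性与界面复杂度", ["confusing", "clunky", "unintuitive", "hard_to_use", "complex", "ui", "ux"]),
--     ("账号与登录", ["login", "login_problem", "account", "auth", "authentication", "password"]),
--     ("客服与退款", ["support", "customer_support", "refund", "ticket", "response"]),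
--     ("隐私与安全", ["privacy", "security", "security_incident", "breach", "encrypted", "encryption"]),
-- ]
--
-- # Inverted index: trigger word -> lowest (highest-priority) rule index containing it.
-- _TRIGGER_INDEX = {}
-- for _i, (_label, _triggers) in enumerate(PAIN_CATEGORY_RULES):
--     for _w in _triggers:
--         _TRIGGER_INDEX.setdefault(_w, _i)
--
--
-- def _label_cluster(keywords):
--     best = None
--     for kw in keywords:
--         for word in [kw.replace(" ", "_")] + kw.split():
--             i = _TRIGGER_INDEX.get(word)
--             if i is not None and (best is None or i < best):
--                 best = i
--     if best is not None:
--         return PAIN_CATEGORY_RULES[best][0]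
--     if keywords:
--         return f"围绕 {keywords[0]} 的集中抱怨"
--     return "未命名痛点"
-- ===== Notes on version B (the rewrite author's own statement) =====
-- stated objective: alternative
-- what changed: Replaces A's per-rule scan with set intersections by a module-level inverted index mapping each trigger word to its lowest rule index, then a single pass over the keywords' words tracking the minimum rule index.
import Mathlib
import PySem

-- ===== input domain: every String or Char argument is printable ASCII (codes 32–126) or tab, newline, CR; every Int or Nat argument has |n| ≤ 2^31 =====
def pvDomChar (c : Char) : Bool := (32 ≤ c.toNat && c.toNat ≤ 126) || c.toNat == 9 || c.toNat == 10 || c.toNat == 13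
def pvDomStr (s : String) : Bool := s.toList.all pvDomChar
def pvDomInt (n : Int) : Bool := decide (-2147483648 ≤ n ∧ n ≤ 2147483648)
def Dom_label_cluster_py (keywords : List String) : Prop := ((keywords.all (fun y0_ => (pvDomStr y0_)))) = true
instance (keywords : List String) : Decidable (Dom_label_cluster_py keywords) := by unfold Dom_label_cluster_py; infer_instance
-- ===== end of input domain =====

-- B replaces A's scan over the 8 rules (set intersection per rule) by a precomputed
-- inverted index trigger-word → lowest rule index, driving one pass over the keywords'
-- words and tracking the minimum rule index (objective: alternative data structure).

-- ===== PORT A =====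
def pyPainRules : List (String × PySem.Set String) :=
  [("稳定性与故障", PySem.Set.ofList ["bug", "crash", "error", "broken", "not_working", "fail", "downtime"]),
   ("性能与响应速度", PySem.Set.ofList ["slow", "laggy", "slow_performance", "latency", "performance"]),
   ("价格与订阅成本", PySem.Set.ofList ["expensive", "overpriced", "pricing", "pricing_problem", "subscription", "refund"]),
   ("功能缺口与集成", PySem.Set.ofList ["missing", "missing_feature", "feature_request", "integration", "api", "export", "import"]),
   ("易用性与界面复杂度", PySem.Set.ofList ["confusing", "clunky", "unintuitive", "hard_to_use", "complex", "ui", "ux"]),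
   ("账号与登录", PySem.Set.ofList ["login", "login_problem", "account", "auth", "authentication", "password"]),
   ("客服与退款", PySem.Set.ofList ["support", "customer_support", "refund", "ticket", "response"]),
   ("隐私与安全", PySem.Set.ofList ["privacy", "security", "security_incident", "breach", "encrypted", "encryption"])]

-- A's `for label, triggers in PAIN_CATEGORY_RULES` loop with its early return,
-- then the two trailing returns.
def pyRuleLoop (keywords : List String) (ksetA : PySem.Set String) :
    List (String × PySem.Set String) → String
  | [] =>
    match keywords with
    | k :: _ => "围绕 " ++ k ++ " 的集中抱怨"
    | [] => "未命名痛点"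
  | (label, triggers) :: rest =>
    -- `if keyword_set & triggers:` — truthiness of the set intersection
    if (PySem.Set.inter ksetA triggers).isEmpty then pyRuleLoop keywords ksetA rest
    else label

def label_cluster_py (keywords : List String) : String :=
  let ksetA := PySem.Set.ofList (keywords.map (fun kw => PySem.Str.replace kw " " "_"))
  let ksetA := PySem.Set.update ksetA (keywords.flatMap (fun kw => PySem.Str.split₀ kw))
  pyRuleLoop keywords ksetA pyPainRules

-- ===== PORT B =====
def bPainRules : List (String × List String) :=
  [("稳定性与故障", ["bug", "crash", "error", "broken", "not_working", "fail", "downtime"]),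
   ("性能与响应速度", ["slow", "laggy", "slow_performance", "latency", "performance"]),
   ("价格与订阅成本", ["expensive", "overpriced", "pricing", "pricing_problem", "subscription", "refund"]),
   ("功能缺口与集成", ["missing", "missing_feature", "feature_request", "integration", "api", "export", "import"]),
   ("易用性与界面复杂度", ["confusing", "clunky", "unintuitive", "hard_to_use", "complex", "ui", "ux"]),
   ("账号与登录", ["login", "login_problem", "account", "auth", "authentication", "password"]),
   ("客服与退款", ["support", "customer_support", "refund", "ticket", "response"]),
   ("隐私与安全", ["privacy", "security", "security_incident", "breach", "encrypted", "encryption"])]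

-- module-level `_TRIGGER_INDEX` built with enumerate + setdefault
def bTriggerIndex : PySem.Dict String Int :=
  (PySem.List.enumerate bPainRules).foldl
    (fun d p => p.2.2.foldl (fun d w => PySem.Dict.setdefault d w p.1) d)
    PySem.Dict.empty

-- one step of B's inner loop: look `word` up, keep the smaller rule index
def bStep (best : Option Int) (word : String) : Option Int :=
  match PySem.Dict.get? bTriggerIndex word with
  | none => best
  | some i =>
    match best with
    | none => some i
    | some b => if i < b then some i else some b

def label_cluster_py_alt (keywords : List String) : String :=
  let best := keywords.foldl
    (fun best kw => ((PySem.Str.replace kw " " "_") :: PySem.Str.split₀ kw).foldl bStep best)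
    none
  match best with
  | some i =>
    -- PAIN_CATEGORY_RULES[best][0]; best is always a valid index, so getD is unreachable
    ((PySem.List.pyGet? bPainRules i).map Prod.fst).getD ""
  | none =>
    match keywords with
    | k :: _ => "围绕 " ++ k ++ " 的集中抱怨"
    | [] => "未命名痛点"

-- ===== PRECONDITION & SPEC =====
def Spec_label_cluster_py (keywords : List String) (out : String) : Prop := out = label_cluster_py_alt keywords
instance (keywords : List String) (out : String) : Decidable (Spec_label_cluster_py keywords out) := by unfold Spec_label_cluster_py; infer_instance

-- ===== CLAIM (what is proved, stated in full; the proofs are below) =====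
def Claim_equal_label_cluster_py : Prop := ∀ (keywords : List String), Dom_label_cluster_py keywords → Spec_label_cluster_py keywords (label_cluster_py keywords)

-- ===== LEMMAS AND PROOFS =====

/-- the list of candidate words, per keyword: normalized form then the split parts -/
def pvWords (keywords : List String) : List String :=
  keywords.flatMap (fun kw => (PySem.Str.replace kw " " "_") :: PySem.Str.split₀ kw)

/-- min-merge on `Option Nat` (`none` = no match yet) -/
def pvMinN (a b : Option Nat) : Option Nat :=
  match a, b with
  | none, b => b
  | a, none => a
  | some x, some y => some (min x y)

/-- B's merge on `Option Int`, exactly the shape of `bStep`'s match -/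
def pvMinI (a b : Option Int) : Option Int :=
  match b with
  | none => a
  | some i =>
    match a with
    | none => some i
    | some x => if i < x then some i else some x

/-- index of the first rule one of the words of `L` triggers -/
def pvG (L : List String) : Option Nat :=
  List.findIdx? (fun r => L.any (fun w => r.2.contains w)) bPainRules

theorem pvMinI_none (b : Option Int) : pvMinI none b = b := by cases b <;> rfl

theorem pvMinI_none' (a : Option Int) : pvMinI a none = a := by cases a <;> rfl

theorem pvMinI_some_some (x i : Int) : pvMinI (some x) (some i) = some (min x i) := by
  simp only [pvMinI]
  split_ifs with h <;> exact congrArg some (by omega)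

theorem pvMinI_cast (a b : Option Nat) :
    pvMinI (a.map (fun n => (n : Int))) (b.map (fun n => (n : Int))) =
      (pvMinN a b).map (fun n => (n : Int)) := by
  cases a <;> cases b <;>
    simp [pvMinI_none, pvMinI_none', pvMinI_some_some, pvMinN, Nat.cast_min]

theorem pvMinI_assoc (a b c : Option Int) :
    pvMinI (pvMinI a b) c = pvMinI a (pvMinI b c) := by
  cases a <;> cases b <;> cases c <;>
    simp [pvMinI_none, pvMinI_none', pvMinI_some_some, min_assoc]

theorem pvMinN_findIdx?_or {α : Type} (l : List α) (p q : α → Bool) :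
    pvMinN (List.findIdx? p l) (List.findIdx? q l) =
      List.findIdx? (fun x => p x || q x) l := by
  induction l with
  | nil => rfl
  | cons x xs ih =>
    simp only [List.findIdx?_cons]
    cases hp : p x <;> cases hq : q x <;> simp [hp, hq, ← ih] <;>
      cases List.findIdx? p xs <;> cases List.findIdx? q xs <;> simp [pvMinN]

theorem pv_setdefault_fold_get? (ws : List String) (i : Int) (d : PySem.Dict String Int) (w : String) :
    (ws.foldl (fun d w' => PySem.Dict.setdefault d w' i) d).get? w =
      (d.get? w).or (if ws.contains w then some i else none) := by
  induction ws generalizing d with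
  | nil => simp
  | cons x xs ih =>
    simp only [List.foldl_cons, ih]
    by_cases hw : w = x
    · subst hw
      rw [PySem.Dict.get?_setdefault_self]
      cases h : d.get? w <;> simp [h]
    · rw [PySem.Dict.get?_setdefault_of_ne d i hw]
      simp only [List.contains_cons]
      have hb : (x == w) = false := by simp [Ne.symm hw]
      simp [hb, hw]

theorem pv_enum_fold_get? (rules : List (String × List String)) (n : Int)
    (d : PySem.Dict String Int) (w : String) :
    ((PySem.List.enumerate rules n).foldl
        (fun d p => p.2.2.foldl (fun d w' => PySem.Dict.setdefault d w' p.1) d) d).get? w =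
      (d.get? w).or ((List.findIdx? (fun r => r.2.contains w) rules).map (fun j => n + j)) := by
  induction rules generalizing n d with
  | nil => simp [PySem.List.enumerate]
  | cons r rs ih =>
    have henum : PySem.List.enumerate (r :: rs) n = (n, r) :: PySem.List.enumerate rs (n + 1) := rfl
    rw [henum, List.foldl_cons, ih, pv_setdefault_fold_get?, List.findIdx?_cons]
    cases hc : r.2.contains w
    · simp only [hc, Bool.false_eq_true, if_false, Option.or_none]
      cases List.findIdx? (fun r => r.2.contains w) rs <;>
        simp [Option.or_assoc] <;> ring
    · simp only [hc, if_true, Option.map_some]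
      cases d.get? w <;> simp [Option.or_assoc]

theorem pv_index_get? (w : String) :
    PySem.Dict.get? bTriggerIndex w =
      (List.findIdx? (fun r => r.2.contains w) bPainRules).map (fun j => (j : Int)) := by
  show (((PySem.List.enumerate bPainRules 0).foldl _ PySem.Dict.empty).get? w) = _
  rw [pv_enum_fold_get?]
  simp

theorem pv_bStep_eq (acc : Option Int) (w : String) :
    bStep acc w = pvMinI acc (PySem.Dict.get? bTriggerIndex w) := by
  unfold bStep pvMinI
  cases PySem.Dict.get? bTriggerIndex w <;> cases acc <;> rfl

theorem pvG_cons (w : String) (L : List String) :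
    pvG (w :: L) = pvMinN (List.findIdx? (fun r => r.2.contains w) bPainRules) (pvG L) := by
  unfold pvG
  rw [pvMinN_findIdx?_or]
  congr 1

theorem pv_foldl_bStep (L : List String) (acc : Option Int) :
    L.foldl bStep acc = pvMinI acc ((pvG L).map (fun n => (n : Int))) := by
  induction L generalizing acc with
  | nil => cases acc <;> rfl
  | cons w L ih =>
    rw [List.foldl_cons, ih, pv_bStep_eq, pv_index_get?, pvMinI_assoc, pvMinI_cast, ← pvG_cons]

theorem pvG_nil : pvG [] = none := by
  unfold pvG
  rw [List.findIdx?_eq_none_iff]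
  intro r _
  simp

theorem pvG_append (L₁ L₂ : List String) :
    pvG (L₁ ++ L₂) = pvMinN (pvG L₁) (pvG L₂) := by
  induction L₁ with
  | nil => rw [List.nil_append, pvG_nil]; cases pvG L₂ <;> rfl
  | cons w L ih =>
    rw [List.cons_append, pvG_cons, pvG_cons, ih]
    cases List.findIdx? (fun r => r.2.contains w) bPainRules <;>
      cases pvG L <;> cases pvG L₂ <;> simp [pvMinN, min_assoc]

theorem pv_best_eq (keywords : List String) :
    keywords.foldl
      (fun best kw => ((PySem.Str.replace kw " " "_") :: PySem.Str.split₀ kw).foldl bStep best)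
      none = (pvG (pvWords keywords)).map (fun n => (n : Int)) := by
  suffices h : ∀ acc, keywords.foldl
      (fun best kw => ((PySem.Str.replace kw " " "_") :: PySem.Str.split₀ kw).foldl bStep best)
      acc = pvMinI acc ((pvG (pvWords keywords)).map (fun n => (n : Int))) by
    rw [h]
    cases pvG (pvWords keywords) <;> rfl
  induction keywords with
  | nil => intro acc; cases acc <;> rfl
  | cons kw kws ih =>
    intro acc
    rw [List.foldl_cons, ih, pv_foldl_bStep, pvMinI_assoc, pvMinI_cast]
    have h1 : pvWords (kw :: kws) =
        (PySem.Str.replace kw " " "_" :: PySem.Str.split₀ kw) ++ pvWords kws := by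
      simp [pvWords]
    rw [h1, pvG_append]

-- membership in the set A builds = membership in the flat word list
theorem pv_mem_update (s : PySem.Set String) (l : List String) (x : String) :
    x ∈ PySem.Set.update s l ↔ x ∈ s ∨ x ∈ l := by
  induction l generalizing s with
  | nil => simp [PySem.Set.update]
  | cons y ys ih =>
    show x ∈ PySem.Set.update (s.add y) ys ↔ _
    rw [ih, PySem.Set.mem_add]
    simp [or_assoc]

theorem pv_mem_ksetA (keywords : List String) (x : String) :
    x ∈ PySem.Set.update
        (PySem.Set.ofList (keywords.map (fun kw => PySem.Str.replace kw " " "_")))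
        (keywords.flatMap (fun kw => PySem.Str.split₀ kw)) ↔ x ∈ pvWords keywords := by
  rw [pv_mem_update, PySem.Set.mem_ofList]
  simp [pvWords, List.mem_flatMap, List.mem_map]
  constructor
  · rintro (⟨kw, hkw, rfl⟩ | ⟨kw, hkw, hx⟩)
    · exact ⟨kw, hkw, Or.inl rfl⟩
    · exact ⟨kw, hkw, Or.inr hx⟩
  · rintro ⟨kw, hkw, rfl | hx⟩
    · exact Or.inl ⟨kw, hkw, rfl⟩
    · exact Or.inr ⟨kw, hkw, hx⟩

theorem pv_hit_bridge (keywords : List String) (trig : List String) :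
    (!(PySem.Set.inter
        (PySem.Set.update
          (PySem.Set.ofList (keywords.map (fun kw => PySem.Str.replace kw " " "_")))
          (keywords.flatMap (fun kw => PySem.Str.split₀ kw)))
        (PySem.Set.ofList trig)).isEmpty) =
      (pvWords keywords).any (fun w => trig.contains w) := by
  rw [Bool.eq_iff_iff]
  simp only [Bool.not_eq_true', List.isEmpty_eq_false_iff, ne_eq, PySem.Set.inter,
    List.any_eq_true]
  rw [← not_iff_not]
  push_neg
  simp only [List.filter_eq_nil_iff, not_exists, not_and]
  constructor
  · intro h x hx
    have hx' := h x ((pv_mem_ksetA keywords x).mpr hx)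
    intro hc
    apply hx'
    have : x ∈ PySem.Set.ofList trig := (PySem.Set.mem_ofList trig x).mpr (by simpa using hc)
    simpa using this
  · intro h x hx hc
    have : x ∈ trig := (PySem.Set.mem_ofList trig x).mp (by simpa using hc)
    exact h x ((pv_mem_ksetA keywords x).mp hx) (by simpa using this)

theorem pv_rules_map :
    pyPainRules = bPainRules.map (fun r => (r.1, PySem.Set.ofList r.2)) := by decide

theorem pv_ruleLoop_eq (keywords : List String) (ksetA : PySem.Set String)
    (rs : List (String × PySem.Set String)) :
    pyRuleLoop keywords ksetA rs =
      match List.findIdx? (fun r => !(PySem.Set.inter ksetA r.2).isEmpty) rs with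
      | some j => ((rs[j]?).map Prod.fst).getD ""
      | none => pyRuleLoop keywords ksetA [] := by
  induction rs with
  | nil => rfl
  | cons r rs ih =>
    obtain ⟨label, trig⟩ := r
    rw [List.findIdx?_cons]
    have hstep : pyRuleLoop keywords ksetA ((label, trig) :: rs) =
        if (PySem.Set.inter ksetA trig).isEmpty then pyRuleLoop keywords ksetA rs
        else label := rfl
    rw [hstep]
    by_cases h : (PySem.Set.inter ksetA trig).isEmpty = true
    · rw [if_pos h, ih]
      simp only [h, Bool.not_true, Bool.false_eq_true, if_false]
      cases hf : List.findIdx? (fun r => !(PySem.Set.inter ksetA r.2).isEmpty) rs <;> simp [hf]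
    · rw [if_neg h]
      simp only [Bool.not_eq_true'] at h
      simp [h]

/-- the shared fallback value of both ports -/
theorem pv_alt_char (keywords : List String) :
    label_cluster_py_alt keywords =
      match pvG (pvWords keywords) with
      | some j => ((bPainRules[j]?).map Prod.fst).getD ""
      | none => pyRuleLoop keywords [] [] := by
  show (match keywords.foldl
      (fun best kw => ((PySem.Str.replace kw " " "_") :: PySem.Str.split₀ kw).foldl bStep best)
      none with
    | some i => ((PySem.List.pyGet? bPainRules i).map Prod.fst).getD ""
    | none =>
      match keywords with
      | k :: _ => "围绕 " ++ k ++ " 的集中抱怨"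
      | [] => "未命名痛点") = _
  rw [pv_best_eq]
  cases pvG (pvWords keywords) with
  | none => rfl
  | some j => simp

theorem pv_a_char (keywords : List String) :
    label_cluster_py keywords =
      match pvG (pvWords keywords) with
      | some j => ((bPainRules[j]?).map Prod.fst).getD ""
      | none => pyRuleLoop keywords [] [] := by
  show pyRuleLoop keywords
      (PySem.Set.update
        (PySem.Set.ofList (keywords.map (fun kw => PySem.Str.replace kw " " "_")))
        (keywords.flatMap (fun kw => PySem.Str.split₀ kw))) pyPainRules = _
  rw [pv_ruleLoop_eq, pv_rules_map, List.findIdx?_map]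
  have hpred : ((fun r : String × PySem.Set String =>
      !(PySem.Set.inter
        (PySem.Set.update
          (PySem.Set.ofList (keywords.map (fun kw => PySem.Str.replace kw " " "_")))
          (keywords.flatMap (fun kw => PySem.Str.split₀ kw))) r.2).isEmpty) ∘
      (fun r : String × List String => (r.1, PySem.Set.ofList r.2))) =
      (fun r : String × List String => (pvWords keywords).any (fun w => r.2.contains w)) := by
    funext r
    exact pv_hit_bridge keywords r.2
  rw [hpred]
  have hfg : List.findIdx? (fun r => (pvWords keywords).any (fun w => r.2.contains w)) bPainRules
      = pvG (pvWords keywords) := rfl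
  rw [hfg]
  cases hf : pvG (pvWords keywords) with
  | none => rfl
  | some j =>
    simp only [List.getElem?_map]
    cases bPainRules[j]? <;> rfl

-- ===== VERDICT (by name: the statement is the Claim_ definition above) =====
theorem label_cluster_py_spec : Claim_equal_label_cluster_py := by
  unfold Claim_equal_label_cluster_py Spec_label_cluster_py
  intro keywords _
  rw [pv_a_char, pv_alt_char]
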